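-- pv_equiv track=rewrite | github.com/Ilan-Goren/ASEProject | polysphere/bitmap_transformations.py | bitmap_to_list
-- ===== SOURCE A (Python) =====
-- def bitmap_to_list(bitmap, width, height):
--     """Convert an integer bitmap back into a 2D list with the given width and height."""
--     piece_list = []
--
--     # Iterate over each row (from bottom to top, since we're reading bits left-to-right)
--     for row in range(height):
--         row_list = []
--         # Extract each bit in the row by shifting the appropriate number of times
--         for col in range(width):
--             # The bit we're interested in is at the position (row * width + col)
--             bit_position = (height - row - 1) * width + (width - col - 1)
--             row_list.insert(0, (bitmap >> bit_position) & 1)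
--         piece_list.append(row_list)
--
--     return piece_list
-- ===== SOURCE B (Python) =====
-- def bitmap_to_list(bitmap, width, height):
--     """Convert an integer bitmap back into a 2D list with the given width and height."""
--     w = width if width > 0 else 0
--     h = height if height > 0 else 0
--     # One flat pass: peel the bits off LSB-first into a single list.
--     bits = []
--     x = bitmap
--     for _ in range(w * h):
--         bits.append(x & 1)
--         x >>= 1
--     # Row r of the output is the contiguous block of the (h-1-r)-th group of w bits.
--     return [bits[(h - 1 - r) * w:(h - r) * w] for r in range(h)]
-- ===== Notes on version B (the rewrite author's own statement) =====
-- stated objective: simpler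
-- what changed: Replaces A's nested row/column loops with per-bit shifts and list.insert(0, ...) by a single flat pass that peels the bits off LSB-first into one list (x & 1; x >>= 1) and then slices out each row as a contiguous block.
import Mathlib
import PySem

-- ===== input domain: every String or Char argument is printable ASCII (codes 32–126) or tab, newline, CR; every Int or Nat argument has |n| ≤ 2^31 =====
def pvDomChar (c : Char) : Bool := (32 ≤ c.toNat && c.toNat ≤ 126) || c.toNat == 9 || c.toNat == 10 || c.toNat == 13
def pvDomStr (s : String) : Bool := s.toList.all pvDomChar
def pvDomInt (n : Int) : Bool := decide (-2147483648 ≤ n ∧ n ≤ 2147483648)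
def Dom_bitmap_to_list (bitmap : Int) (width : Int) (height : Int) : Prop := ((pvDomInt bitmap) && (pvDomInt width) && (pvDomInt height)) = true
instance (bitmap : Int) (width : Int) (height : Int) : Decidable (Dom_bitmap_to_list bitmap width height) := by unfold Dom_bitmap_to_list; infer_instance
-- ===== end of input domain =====

-- B replaces A's nested loops with front-insertion by one flat LSB-first bit-peeling pass plus row slicing (objective: simpler; a timing run measured it faster).


-- ===== PORT A =====
-- literal port of A; bit_position is provably ≥ 0 for every loop index (row < height, col < width),
-- so '.toNat' on the shift amount is exact (Python's '>>' would only raise on a negative shift, never reached here)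
def bitmap_to_list (bitmap : Int) (width : Int) (height : Int) : List (List Int) :=
  (PySem.List.pyRange 0 height 1).foldl (fun piece_list row =>
    let row_list := (PySem.List.pyRange 0 width 1).foldl (fun row_list col =>
      let bit_position := (height - row - 1) * width + (width - col - 1)
      PySem.List.insert row_list 0 (PySem.Int.band (bitmap >>> bit_position.toNat) 1)) []
    piece_list ++ [row_list]) []

-- ===== PORT B =====
-- literal port of Source B: one flat pass peeling bits LSB-first, then one slice per row
def bitmap_to_list_alt (bitmap : Int) (width : Int) (height : Int) : List (List Int) :=
  let w := if width > 0 then width else 0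
  let h := if height > 0 then height else 0
  let st := (PySem.List.pyRange 0 (w * h) 1).foldl
      (fun (st : List Int × Int) _ => (st.1 ++ [PySem.Int.band st.2 1], st.2 >>> (1 : Nat)))
      ([], bitmap)
  (PySem.List.pyRange 0 h 1).map (fun r =>
    PySem.List.slice st.1 (some ((h - 1 - r) * w)) (some ((h - r) * w)))

-- ===== PRECONDITION & SPEC =====
def Spec_bitmap_to_list (bitmap : Int) (width : Int) (height : Int) (out : List (List Int)) : Prop := out = bitmap_to_list_alt bitmap width height
instance (bitmap : Int) (width : Int) (height : Int) (out : List (List Int)) : Decidable (Spec_bitmap_to_list bitmap width height out) := by unfold Spec_bitmap_to_list; infer_instance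

-- ===== CLAIM (what is proved, stated in full; the proofs are below) =====
def Claim_equal_bitmap_to_list : Prop := ∀ (bitmap : Int) (width : Int) (height : Int), Dom_bitmap_to_list bitmap width height → Spec_bitmap_to_list bitmap width height (bitmap_to_list bitmap width height)

-- ===== LEMMAS AND PROOFS =====

-- canonical form both ports are reduced to: row r, column j holds bit ((H-1-r)*W + j) of bitmap
def pvCanon (bitmap : Int) (W H : Nat) : List (List Int) :=
  (List.range H).map (fun r =>
    (List.range W).map (fun j => PySem.Int.band (bitmap >>> ((H - 1 - r) * W + j)) 1))

theorem pv_foldl_insert_zero {α : Type} (L : List α) (f : α → Int) (acc : List Int) :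
    L.foldl (fun rl c => PySem.List.insert rl 0 (f c)) acc = (L.map f).reverse ++ acc := by
  induction L generalizing acc with
  | nil => simp
  | cons x xs ih => simp [PySem.List.insert_zero]

theorem pv_reverse_map_range {α : Type} (n : Nat) (f : Nat → α) :
    ((List.range n).map f).reverse = (List.range n).map (fun i => f (n - 1 - i)) := by
  apply List.ext_getElem
  · simp
  · intro i h1 h2
    simp only [List.getElem_reverse, List.getElem_map, List.getElem_range, List.length_map,
      List.length_range] at *

theorem pv_slice_bits {α : Type} (n a W : Nat) (f : Nat → α) (hab : a + W ≤ n) :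
    (((List.range n).map f).drop a).take W = (List.range W).map (fun j => f (a + j)) := by
  apply List.ext_getElem
  · simp; omega
  · intro i h1 h2
    simp only [List.getElem_take, List.getElem_drop, List.getElem_map, List.getElem_range]

theorem pv_A_eq_canon (bitmap width height : Int) :
    bitmap_to_list bitmap width height = pvCanon bitmap width.toNat height.toNat := by
  unfold bitmap_to_list pvCanon
  rw [PySem.List.pyRange_one 0 height, PySem.List.pyRange_one 0 width]
  simp only [Int.sub_zero, zero_add, List.foldl_map,
    PySem.List.foldl_append_singleton_eq_map]
  apply List.map_congr_left
  intro r hr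
  rw [List.mem_range] at hr
  have hH : height = (height.toNat : Int) := by omega
  rw [pv_foldl_insert_zero (List.range width.toNat)
    (fun y => PySem.Int.band (bitmap >>> ((height - (r:Int) - 1) * width + (width - (y:Int) - 1)).toNat) 1),
    pv_reverse_map_range, List.append_nil]
  apply List.map_congr_left
  intro i hi
  rw [List.mem_range] at hi
  have hW : width = (width.toNat : Int) := by omega
  congr 1
  have : ((height - (r : Int) - 1) * width + (width - ((width.toNat - 1 - i : Nat) : Int) - 1))
      = (((height.toNat - 1 - r) * width.toNat + i : Nat) : Int) := by
    rw [hH, hW]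
    push_cast [Nat.sub_sub]
    rw [Int.natCast_sub (by omega), Int.natCast_sub (by omega)]
    push_cast
    simp only [Int.toNat_natCast]
    ring
  rw [this, Int.toNat_natCast]

theorem pv_B_bits (L : List Int) (acc : List Int) (x : Int) :
    L.foldl (fun (st : List Int × Int) _ => (st.1 ++ [PySem.Int.band st.2 1], st.2 >>> (1 : Nat))) (acc, x)
      = (acc ++ (List.range L.length).map (fun (k : Nat) => PySem.Int.band (x >>> k) 1), x >>> L.length) := by
  induction L generalizing acc x with
  | nil => simp
  | cons y ys ih =>
    simp only [List.foldl_cons, ih, List.length_cons]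
    refine Prod.ext ?_ ?_
    · simp [List.range_succ_eq_map]
      intro a _
      rw [← Int.shiftRight_add, Nat.add_comm]
    · rw [← Int.shiftRight_add, Nat.add_comm]

theorem pv_B_eq_canon (bitmap width height : Int) :
    bitmap_to_list_alt bitmap width height = pvCanon bitmap width.toNat height.toNat := by
  unfold bitmap_to_list_alt pvCanon
  have hw : (if width > 0 then width else 0) = ((width.toNat : Int)) := by
    split_ifs <;> omega
  have hh : (if height > 0 then height else 0) = ((height.toNat : Int)) := by
    split_ifs <;> omega
  simp only [hw, hh]
  rw [pv_B_bits, PySem.List.pyRange_one 0 ((height.toNat : Int))]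
  simp only [Int.sub_zero, zero_add, Int.toNat_natCast, List.map_map, Function.comp_def,
    List.nil_append]
  apply List.map_congr_left
  intro r hr
  rw [List.mem_range] at hr
  have ha : ((width.toNat : Int) * (height.toNat : Int)).toNat = height.toNat * width.toNat := by
    rw [← Int.natCast_mul, Int.toNat_natCast, Nat.mul_comm]
  rw [PySem.List.length_pyRange_one] at *
  simp only [Int.sub_zero] at *
  rw [ha]
  have h1 : ((height.toNat : Int) - 1 - (r : Int)) * (width.toNat : Int)
      = (((height.toNat - 1 - r) * width.toNat : Nat) : Int) := by
    push_cast [Nat.sub_sub]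
    rw [Int.natCast_sub (by omega)]
    push_cast
    ring
  have h2 : ((height.toNat : Int) - (r : Int)) * (width.toNat : Int)
      = (((height.toNat - r) * width.toNat : Nat) : Int) := by
    push_cast
    rw [Int.natCast_sub (by omega)]
  rw [h1, h2, PySem.List.slice_natCast]
  have h3 : (height.toNat - r) * width.toNat - (height.toNat - 1 - r) * width.toNat
      = width.toNat := by
    rw [← Nat.sub_mul]
    have : height.toNat - r - (height.toNat - 1 - r) = 1 := by omega
    rw [this, Nat.one_mul]
  rw [h3, pv_slice_bits]
  calc (height.toNat - 1 - r) * width.toNat + width.toNat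
      = (height.toNat - r) * width.toNat := by
        rw [← Nat.succ_mul]; congr 1; omega
    _ ≤ height.toNat * width.toNat := Nat.mul_le_mul_right _ (by omega)

-- ===== VERDICT (by name: the statement is the Claim_ definition above) =====
theorem bitmap_to_list_spec : Claim_equal_bitmap_to_list := by
  intro bitmap width height _
  unfold Spec_bitmap_to_list
  rw [pv_A_eq_canon, pv_B_eq_canon]
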